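-- pv_equiv track=rewrite | github.com/hail2222/pii-unlearning-for-rag | entropy_utils.py | find_pii_token_positions
-- ===== SOURCE A (Python) =====
-- def find_pii_token_positions(
--     generated_ids: list[int],
--     pii_values_ids: list[list[int]],
-- ) -> list[int]:
--     """
--     Find positions where any individual PII value appears in generated_ids.
--     Each element of pii_values_ids is a list of candidate token-id sequences
--     for the same PII string (with/without leading space variants).
--
--     Returns sorted, deduplicated list of start indices.
--     """
--     positions = set()
--     n = len(generated_ids)
--     for candidate_list in pii_values_ids:
--         # candidate_list may be a flat list[int] or list[list[int]]
--         # normalise to list[list[int]]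
--         if not candidate_list:
--             continue
--         if isinstance(candidate_list[0], int):
--             sequences = [candidate_list]
--         else:
--             sequences = candidate_list
--
--         for seq in sequences:
--             m = len(seq)
--             if m == 0:
--                 continue
--             for i in range(n - m + 1):
--                 if generated_ids[i:i + m] == seq:
--                     positions.add(i)
--     return sorted(positions)
-- ===== SOURCE B (Python) =====
-- def find_pii_token_positions(
--     generated_ids: list[int],
--     pii_values_ids: list[list[int]],
-- ) -> list[int]:
--     """Group the non-empty patterns by length into a dict mapping
--     length -> set of patterns; then for each distinct length slide ONE
--     window over generated_ids and test window-membership in that set.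
--     The per-pattern offset scan of the naive version disappears: the
--     match test at a position is a single hash lookup per distinct length."""
--     by_len = {}
--     for seq in pii_values_ids:
--         if seq:
--             by_len.setdefault(len(seq), set()).add(tuple(seq))
--     n = len(generated_ids)
--     positions = set()
--     for m, pats in by_len.items():
--         for i in range(n - m + 1):
--             if tuple(generated_ids[i:i + m]) in pats:
--                 positions.add(i)
--     return sorted(positions)
-- ===== Notes on version B (the rewrite author's own statement) =====
-- stated objective: faster
-- what changed: B indexes the non-empty patterns in a hash map from length to a set of patterns and then slides one window per distinct length over generated_ids, testing window-membership in the set, so A's per-pattern slice-comparison scan over all offsets disappears.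
import Mathlib
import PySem

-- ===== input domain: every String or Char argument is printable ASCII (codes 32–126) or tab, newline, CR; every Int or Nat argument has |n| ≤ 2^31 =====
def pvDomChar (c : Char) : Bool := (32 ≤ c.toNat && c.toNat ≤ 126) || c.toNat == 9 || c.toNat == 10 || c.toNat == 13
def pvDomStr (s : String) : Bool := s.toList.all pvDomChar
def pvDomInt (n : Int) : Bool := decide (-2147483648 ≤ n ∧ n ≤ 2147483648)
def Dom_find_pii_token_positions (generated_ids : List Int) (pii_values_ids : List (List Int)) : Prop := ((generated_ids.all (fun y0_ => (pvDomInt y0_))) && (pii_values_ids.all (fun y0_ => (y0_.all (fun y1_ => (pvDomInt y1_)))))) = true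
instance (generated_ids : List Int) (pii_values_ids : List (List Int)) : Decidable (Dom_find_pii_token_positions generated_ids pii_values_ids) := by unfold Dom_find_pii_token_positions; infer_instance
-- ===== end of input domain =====

-- B replaces A's per-pattern offset scan by a length-indexed hash map: patterns are grouped by
-- length into a dict length -> set of patterns, and one window per distinct length slides over
-- generated_ids testing set membership (objective: faster; measured faster in a timing run).

-- ===== PORT A =====
-- At the typed signature each candidate_list is a flat List Int, so
-- isinstance(candidate_list[0], int) always holds and sequences = [candidate_list].
def find_pii_token_positions (generated_ids : List Int) (pii_values_ids : List (List Int)) : List Int :=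
  let n : Int := generated_ids.length
  let positions : PySem.Set Int :=
    pii_values_ids.foldl (fun positions candidate_list =>
      if candidate_list = [] then positions
      else
        [candidate_list].foldl (fun positions seq =>
          let m : Int := seq.length
          if m = 0 then positions
          else
            (PySem.List.pyRange 0 (n - m + 1) 1).foldl (fun positions i =>
              if PySem.List.slice generated_ids (some i) (some (i + m)) = seq
              then PySem.Set.add positions i else positions) positions) positions)
      PySem.Set.empty
  PySem.List.sorted positions (fun x => x) false

-- ===== PORT B =====
def find_pii_token_positions_alt (generated_ids : List Int) (pii_values_ids : List (List Int)) : List Int :=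
  let by_len : PySem.Dict Int (PySem.Set (List Int)) :=
    pii_values_ids.foldl (fun d seq =>
      if seq = [] then d
      else PySem.Dict.modify d (seq.length : Int) PySem.Set.empty (fun S => PySem.Set.add S seq))
      PySem.Dict.empty
  let n : Int := generated_ids.length
  let positions : PySem.Set Int :=
    by_len.items.foldl (fun positions mp =>
      (PySem.List.pyRange 0 (n - mp.1 + 1) 1).foldl (fun positions i =>
        if PySem.List.slice generated_ids (some i) (some (i + mp.1)) ∈ mp.2
        then PySem.Set.add positions i else positions) positions)
      PySem.Set.empty
  PySem.List.sorted positions (fun x => x) false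

-- ===== PRECONDITION & SPEC =====
def Spec_find_pii_token_positions (generated_ids : List Int) (pii_values_ids : List (List Int)) (out : List Int) : Prop := out = find_pii_token_positions_alt generated_ids pii_values_ids
instance (generated_ids : List Int) (pii_values_ids : List (List Int)) (out : List Int) : Decidable (Spec_find_pii_token_positions generated_ids pii_values_ids out) := by unfold Spec_find_pii_token_positions; infer_instance

-- ===== CLAIM (what is proved, stated in full; the proofs are below) =====
def Claim_equal_find_pii_token_positions : Prop := ∀ (generated_ids : List Int) (pii_values_ids : List (List Int)), Dom_find_pii_token_positions generated_ids pii_values_ids → Spec_find_pii_token_positions generated_ids pii_values_ids (find_pii_token_positions generated_ids pii_values_ids)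

-- ===== LEMMAS AND PROOFS =====

-- A's outer loop body, named so the induction hypothesis matches syntactically
def AstepFn (g : List Int) : List Int → List Int → List Int := fun positions candidate_list =>
  if candidate_list = [] then positions
  else
    [candidate_list].foldl (fun positions seq =>
      let m : Int := seq.length
      if m = 0 then positions
      else
        (PySem.List.pyRange 0 ((g.length : Int) - m + 1) 1).foldl (fun positions i =>
          if PySem.List.slice g (some i) (some (i + m)) = seq
          then PySem.Set.add positions i else positions) positions) positions

theorem A_eq (g : List Int) (p : List (List Int)) :
    find_pii_token_positions g p = PySem.List.sorted (p.foldl (AstepFn g) PySem.Set.empty) (fun x => x) false := rfl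

theorem AstepFn_eq (g : List Int) (positions cl : List Int) :
    AstepFn g positions cl =
      if cl = [] then positions
      else (PySem.List.pyRange 0 ((g.length : Int) - (cl.length : Int) + 1) 1).foldl (fun positions i =>
          if PySem.List.slice g (some i) (some (i + (cl.length : Int))) = cl
          then PySem.Set.add positions i else positions) positions := by
  unfold AstepFn
  by_cases hcl : cl = []
  · simp [hcl]
  · simp [hcl]

-- membership in a conditional Set.add fold
theorem mem_foldl_add_if {c : Int → Prop} [DecidablePred c] (l : List Int) (s0 : List Int) (x : Int) :
    x ∈ l.foldl (fun s i => if c i then PySem.Set.add s i else s) s0 ↔ x ∈ s0 ∨ (x ∈ l ∧ c x) := by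
  induction l generalizing s0 with
  | nil => simp
  | cons a l ih =>
    simp only [List.foldl_cons, ih, List.mem_cons]
    by_cases h : c a
    · simp only [if_pos h, PySem.Set.mem_add]
      constructor
      · rintro ((hx | rfl) | ⟨hl, hc⟩)
        · exact Or.inl hx
        · exact Or.inr ⟨Or.inl rfl, h⟩
        · exact Or.inr ⟨Or.inr hl, hc⟩
      · rintro (hx | ⟨rfl | hl, hc⟩)
        · exact Or.inl (Or.inl hx)
        · exact Or.inl (Or.inr rfl)
        · exact Or.inr ⟨hl, hc⟩
    · simp only [if_neg h]
      constructor
      · rintro (hx | ⟨hl, hc⟩)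
        · exact Or.inl hx
        · exact Or.inr ⟨Or.inr hl, hc⟩
      · rintro (hx | ⟨rfl | hl, hc⟩)
        · exact Or.inl hx
        · exact absurd hc h
        · exact Or.inr ⟨hl, hc⟩

theorem nodup_foldl_add_if {c : Int → Prop} [DecidablePred c] (l : List Int) (s0 : List Int)
    (h : s0.Nodup) : (l.foldl (fun s i => if c i then PySem.Set.add s i else s) s0).Nodup := by
  induction l generalizing s0 with
  | nil => exact h
  | cons a l ih =>
    simp only [List.foldl_cons]
    apply ih
    split
    · exact PySem.Set.nodup_add s0 a h
    · exact h

-- characterisation of A's accumulated set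
theorem mem_A_set (g : List Int) (p : List (List Int)) (s0 : List Int) (x : Int) :
    x ∈ p.foldl (AstepFn g) s0
    ↔ x ∈ s0 ∨ ∃ s ∈ p, s ≠ [] ∧ x ∈ PySem.List.pyRange 0 ((g.length : Int) - (s.length : Int) + 1) 1 ∧
        PySem.List.slice g (some x) (some (x + (s.length : Int))) = s := by
  induction p generalizing s0 with
  | nil => simp
  | cons cl p ih =>
    simp only [List.foldl_cons, ih, AstepFn_eq]
    by_cases hcl : cl = []
    · simp only [if_pos hcl]
      constructor
      · rintro (hx | ⟨s, hs, h1, h2, h3⟩)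
        · exact Or.inl hx
        · exact Or.inr ⟨s, List.mem_cons_of_mem _ hs, h1, h2, h3⟩
      · rintro (hx | ⟨s, hs, h1, h2, h3⟩)
        · exact Or.inl hx
        · rcases List.mem_cons.mp hs with rfl | hs'
          · exact absurd hcl h1
          · exact Or.inr ⟨s, hs', h1, h2, h3⟩
    · rw [if_neg hcl, mem_foldl_add_if]
      constructor
      · rintro ((hx | ⟨hr, hsl⟩) | ⟨s, hs, h1, h2, h3⟩)
        · exact Or.inl hx
        · exact Or.inr ⟨cl, by simp, hcl, hr, hsl⟩
        · exact Or.inr ⟨s, List.mem_cons_of_mem _ hs, h1, h2, h3⟩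
      · rintro (hx | ⟨s, hs, h1, h2, h3⟩)
        · exact Or.inl (Or.inl hx)
        · rcases List.mem_cons.mp hs with rfl | hs'
          · exact Or.inl (Or.inr ⟨h2, h3⟩)
          · exact Or.inr ⟨s, hs', h1, h2, h3⟩

theorem nodup_A_set (g : List Int) (p : List (List Int)) (s0 : List Int) (h : s0.Nodup) :
    (p.foldl (AstepFn g) s0).Nodup := by
  induction p generalizing s0 with
  | nil => exact h
  | cons cl p ih =>
    simp only [List.foldl_cons, AstepFn_eq]
    apply ih
    split
    · exact h
    · exact nodup_foldl_add_if _ _ h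

-- B's dict-building step, named
def BbuildFn : PySem.Dict Int (PySem.Set (List Int)) → List Int → PySem.Dict Int (PySem.Set (List Int)) :=
  fun d seq =>
    if seq = [] then d
    else PySem.Dict.modify d (seq.length : Int) PySem.Set.empty (fun S => PySem.Set.add S seq)

-- B's match step over one dict item, named
def BmatchFn (g : List Int) : List Int → Int × PySem.Set (List Int) → List Int := fun positions mp =>
  (PySem.List.pyRange 0 ((g.length : Int) - mp.1 + 1) 1).foldl (fun positions i =>
    if PySem.List.slice g (some i) (some (i + mp.1)) ∈ mp.2
    then PySem.Set.add positions i else positions) positions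

theorem B_eq (g : List Int) (p : List (List Int)) :
    find_pii_token_positions_alt g p =
      PySem.List.sorted
        (((p.foldl BbuildFn PySem.Dict.empty).items).foldl (BmatchFn g) PySem.Set.empty)
        (fun x => x) false := rfl

-- contents of the length-indexed dict
theorem mem_getD_Bbuild (l : List (List Int)) (d : PySem.Dict Int (PySem.Set (List Int)))
    (m : Int) (s : List Int) :
    s ∈ (l.foldl BbuildFn d).getD m PySem.Set.empty
    ↔ s ∈ d.getD m PySem.Set.empty ∨ (s ∈ l ∧ s ≠ [] ∧ (s.length : Int) = m) := by
  induction l generalizing d with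
  | nil => simp
  | cons a l ih =>
    simp only [List.foldl_cons, ih, BbuildFn, List.mem_cons]
    by_cases ha : a = []
    · simp only [if_pos ha]
      constructor
      · rintro (hx | h)
        · exact Or.inl hx
        · exact Or.inr ⟨Or.inr h.1, h.2⟩
      · rintro (hx | ⟨rfl | hl, h2, h3⟩)
        · exact Or.inl hx
        · exact absurd ha h2
        · exact Or.inr ⟨hl, h2, h3⟩
    · rw [if_neg ha, PySem.Dict.getD_modify]
      by_cases hm : m = (a.length : Int)
      · subst hm
        rw [if_pos rfl]
        simp only [PySem.Set.mem_add]
        constructor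
        · rintro ((hx | rfl) | h)
          · exact Or.inl hx
          · exact Or.inr ⟨Or.inl rfl, ha, rfl⟩
          · exact Or.inr ⟨Or.inr h.1, h.2⟩
        · rintro (hx | ⟨rfl | hl, h2, h3⟩)
          · exact Or.inl (Or.inl hx)
          · exact Or.inl (Or.inr rfl)
          · exact Or.inr ⟨hl, h2, h3⟩
      · simp only [if_neg hm]
        constructor
        · rintro (hx | h)
          · exact Or.inl hx
          · exact Or.inr ⟨Or.inr h.1, h.2⟩
        · rintro (hx | ⟨rfl | hl, h2, h3⟩)
          · exact Or.inl hx
          · exact absurd h3.symm hm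
          · exact Or.inr ⟨hl, h2, h3⟩

theorem mem_keys_Bbuild (l : List (List Int)) (d : PySem.Dict Int (PySem.Set (List Int))) (m : Int) :
    m ∈ (l.foldl BbuildFn d).keys
    ↔ m ∈ d.keys ∨ ∃ s ∈ l, s ≠ [] ∧ (s.length : Int) = m := by
  induction l generalizing d with
  | nil => simp
  | cons a l ih =>
    simp only [List.foldl_cons, ih, BbuildFn, List.mem_cons]
    by_cases ha : a = []
    · simp only [if_pos ha]
      constructor
      · rintro (hx | ⟨s, hs, h2, h3⟩)
        · exact Or.inl hx
        · exact Or.inr ⟨s, Or.inr hs, h2, h3⟩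
      · rintro (hx | ⟨s, rfl | hs, h2, h3⟩)
        · exact Or.inl hx
        · exact absurd ha h2
        · exact Or.inr ⟨s, hs, h2, h3⟩
    · rw [if_neg ha]
      have hk : m ∈ (PySem.Dict.modify d (a.length : Int) PySem.Set.empty (fun S => PySem.Set.add S a)).keys
          ↔ m = (a.length : Int) ∨ m ∈ d.keys := by
        rw [PySem.Dict.keys_modify]
        exact PySem.Dict.mem_keys_insert d (a.length : Int) m _
      rw [hk]
      constructor
      · rintro ((rfl | hx) | ⟨s, hs, h2, h3⟩)
        · exact Or.inr ⟨a, Or.inl rfl, ha, rfl⟩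
        · exact Or.inl hx
        · exact Or.inr ⟨s, Or.inr hs, h2, h3⟩
      · rintro (hx | ⟨s, rfl | hs, h2, h3⟩)
        · exact Or.inl (Or.inr hx)
        · exact Or.inl (Or.inl h3.symm)
        · exact Or.inr ⟨s, hs, h2, h3⟩

theorem nodup_keys_Bbuild (l : List (List Int)) :
    (l.foldl BbuildFn PySem.Dict.empty).keys.Nodup := by
  have h : l.foldl BbuildFn PySem.Dict.empty
      = (l.filter (fun s => !decide (s = []))).foldl
          (fun d seq => PySem.Dict.modify d (seq.length : Int) PySem.Set.empty (fun S => PySem.Set.add S seq))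
          PySem.Dict.empty := by
    rw [← PySem.List.foldl_if_eq_foldl_filter]
    apply PySem.List.foldl_congr_mem
    intro acc x _
    simp only [BbuildFn, Bool.not_eq_eq_eq_not, Bool.not_true, decide_eq_false_iff_not]
    by_cases hx : x = [] <;> simp [hx]
  rw [h]
  exact PySem.Dict.nodup_keys_foldl_modify_key _ (fun (s : List Int) => (s.length : Int))
    PySem.Set.empty (fun _ seq S => PySem.Set.add S seq) _ PySem.Dict.nodup_keys_empty

-- membership in B's accumulated position set, over a list of dict items
theorem mem_B_posfold (g : List Int) (items : List (Int × PySem.Set (List Int)))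
    (s0 : List Int) (x : Int) :
    x ∈ items.foldl (BmatchFn g) s0
    ↔ x ∈ s0 ∨ ∃ mp ∈ items, x ∈ PySem.List.pyRange 0 ((g.length : Int) - mp.1 + 1) 1 ∧
        PySem.List.slice g (some x) (some (x + mp.1)) ∈ mp.2 := by
  induction items generalizing s0 with
  | nil => simp
  | cons a l ih =>
    simp only [List.foldl_cons, ih, BmatchFn, mem_foldl_add_if, List.mem_cons]
    constructor
    · rintro ((hx | ⟨hr, hsl⟩) | ⟨mp, hmp, h1, h2⟩)
      · exact Or.inl hx
      · exact Or.inr ⟨a, Or.inl rfl, hr, hsl⟩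
      · exact Or.inr ⟨mp, Or.inr hmp, h1, h2⟩
    · rintro (hx | ⟨mp, rfl | hmp, h1, h2⟩)
      · exact Or.inl (Or.inl hx)
      · exact Or.inl (Or.inr ⟨h1, h2⟩)
      · exact Or.inr ⟨mp, hmp, h1, h2⟩

theorem nodup_B_posfold (g : List Int) (items : List (Int × PySem.Set (List Int)))
    (s0 : List Int) (h : s0.Nodup) : (items.foldl (BmatchFn g) s0).Nodup := by
  induction items generalizing s0 with
  | nil => exact h
  | cons a l ih =>
    simp only [List.foldl_cons, BmatchFn]
    exact ih _ (nodup_foldl_add_if _ _ h)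

-- B's set has exactly A's membership condition
theorem mem_B_set (g : List Int) (p : List (List Int)) (x : Int) :
    x ∈ ((p.foldl BbuildFn PySem.Dict.empty).items).foldl (BmatchFn g) PySem.Set.empty
    ↔ ∃ s ∈ p, s ≠ [] ∧ x ∈ PySem.List.pyRange 0 ((g.length : Int) - (s.length : Int) + 1) 1 ∧
        PySem.List.slice g (some x) (some (x + (s.length : Int))) = s := by
  rw [mem_B_posfold]
  simp only [PySem.Set.empty, List.not_mem_nil, false_or]
  rw [PySem.Dict.items_eq_map_keys _ (nodup_keys_Bbuild p) PySem.Set.empty]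
  constructor
  · rintro ⟨mp, hmp, h1, h2⟩
    rcases List.mem_map.mp hmp with ⟨m, _hm, rfl⟩
    rcases (mem_getD_Bbuild p PySem.Dict.empty m _).mp h2 with hx | ⟨hsl, hne, hlen⟩
    · simp [PySem.Dict.getD_empty, PySem.Set.empty] at hx
    · exact ⟨_, hsl, hne, by rw [hlen]; exact h1, by rw [hlen]⟩
  · rintro ⟨s, hs, hne, h1, h2⟩
    refine ⟨((s.length : Int), (p.foldl BbuildFn PySem.Dict.empty).getD (s.length : Int) PySem.Set.empty), ?_, h1, ?_⟩
    · exact List.mem_map.mpr ⟨(s.length : Int),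
        (mem_keys_Bbuild p PySem.Dict.empty _).mpr (Or.inr ⟨s, hs, hne, rfl⟩), rfl⟩
    · rw [h2]
      exact (mem_getD_Bbuild p PySem.Dict.empty _ s).mpr (Or.inr ⟨hs, hne, rfl⟩)

-- ===== VERDICT (by name: the statement is the Claim_ definition above) =====
theorem find_pii_token_positions_spec : Claim_equal_find_pii_token_positions := by
  intro g p _
  unfold Spec_find_pii_token_positions
  rw [A_eq, B_eq, PySem.List.sorted_id_eq_sorted_id_iff_perm]
  apply (List.perm_ext_iff_of_nodup (nodup_A_set g p PySem.Set.empty List.nodup_nil)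
    (nodup_B_posfold g _ PySem.Set.empty List.nodup_nil)).mpr
  intro x
  rw [mem_A_set, mem_B_set]
  simp only [PySem.Set.empty, List.not_mem_nil, false_or]
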